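-- pv_equiv track=rewrite | github.com/jp-ganis/rankings_scriptures | gaussian_fitter.py | get_win_distribution
-- ===== SOURCE A (Python) =====
-- def get_win_distribution(n,rounds=5):
-- 	players = [(p, 0) for p in range(n)]
--
-- 	for r in range(rounds):
-- 		players = sorted(players, key=lambda p: p[1], reverse=True)
--
-- 		for i in range(0, len(players), 2):
-- 			players[i] = (players[i][0], players[i][1]+1)
--
--
-- 	players = sorted(players, key=lambda p: p[1], reverse=True)
--
-- 	results = [{r:len([p for p in players if p[1] == r])} for r in range(rounds+1)]
-- 	wins = [p[1] for p in players]
-- 	# wins = {i: wins.count(i) for i in range(rounds+1)}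
--
-- 	return wins
-- ===== SOURCE B (Python) =====
-- def get_win_distribution(n, rounds=5):
--     # Bucket simulation: maintain (win-value, player-count) pairs in descending
--     # win order; each round the players at even global indices of the sorted
--     # standings win, which is pure index-parity arithmetic on the buckets.
--     if n <= 0:
--         return []
--     counts = [(0, n)]  # descending win values, positive counts
--     for _ in range(rounds):
--         new = []
--         parity_even = True  # parity of the global index where the next bucket starts
--         for w, k in counts:
--             winners = (k + 1) // 2 if parity_even else k // 2
--             losers = k - winners
--             if winners:
--                 if new and new[-1][0] == w + 1:
--                     new[-1] = (w + 1, new[-1][1] + winners)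
--                 else:
--                     new.append((w + 1, winners))
--             if losers:
--                 new.append((w, losers))
--             if k % 2 == 1:
--                 parity_even = not parity_even
--         counts = new
--     res = []
--     for w, c in counts:
--         res += [w] * c
--     return res
-- ===== Notes on version B (the rewrite author's own statement) =====
-- stated objective: faster
-- what changed: Instead of re-sorting the full n-player list every round and bumping every even index, B keeps (win-value, player-count) buckets in descending order and updates each round with index-parity arithmetic, expanding the counts into the result list once at the end.
import Mathlib
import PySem

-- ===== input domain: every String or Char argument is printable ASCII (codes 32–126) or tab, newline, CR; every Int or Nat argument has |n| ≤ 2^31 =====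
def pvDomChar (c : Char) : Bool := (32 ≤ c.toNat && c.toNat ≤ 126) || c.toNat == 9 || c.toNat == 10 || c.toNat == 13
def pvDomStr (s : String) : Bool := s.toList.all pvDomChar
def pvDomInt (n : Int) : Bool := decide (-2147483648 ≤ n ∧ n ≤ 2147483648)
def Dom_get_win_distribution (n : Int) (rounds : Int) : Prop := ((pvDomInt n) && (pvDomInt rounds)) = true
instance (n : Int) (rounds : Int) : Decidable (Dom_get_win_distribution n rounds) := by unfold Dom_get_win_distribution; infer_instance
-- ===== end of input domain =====

-- B replaces A's per-round sort-and-bump over all n players by index-parity arithmetic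
-- on (win-value, player-count) buckets, expanded into the win list once at the end.

-- ===== PORT A =====
def get_win_distribution (n : Int) (rounds : Int) : List Int :=
  let players := (PySem.List.pyRange 0 n 1).map (fun p => (p, (0 : Int)))
  let players := (PySem.List.pyRange 0 rounds 1).foldl (fun players _r =>
      let players := PySem.List.sorted players (fun p => p.2) true
      (PySem.List.pyRange 0 (players.length : Int) 2).foldl (fun ps i =>
        PySem.List.pySetD ps i ((PySem.List.pyGetD ps i ((0 : Int), (0 : Int))).1,
                                (PySem.List.pyGetD ps i ((0 : Int), (0 : Int))).2 + 1)) players)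
    players
  let players := PySem.List.sorted players (fun p => p.2) true
  let _results := (PySem.List.pyRange 0 (rounds + 1) 1).map (fun r =>
      PySem.Dict.insert (PySem.Dict.empty : PySem.Dict Int Int) r ((players.filter (fun p => p.2 == r)).length : Int))
  players.map (fun p => p.2)

-- ===== PORT B =====
-- one bucket (w, k) of B's inner loop: state = (new bucket list, parity of next start index)
def gwdBucketStep (st : List (Int × Int) × Bool) (wk : Int × Int) : List (Int × Int) × Bool :=
  let acc := st.1
  let pe := st.2
  let w := wk.1
  let k := wk.2
  let winners := if pe then PySem.Int.floordiv (k + 1) 2 else PySem.Int.floordiv k 2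
  let losers := k - winners
  let acc := if winners ≠ 0 then
      match acc.getLast? with
      | some last => if last.1 = w + 1 then acc.dropLast ++ [(w + 1, last.2 + winners)]
                     else acc ++ [(w + 1, winners)]
      | none => acc ++ [(w + 1, winners)]
    else acc
  let acc := if losers ≠ 0 then acc ++ [(w, losers)] else acc
  let pe := if PySem.Int.mod k 2 = 1 then !pe else pe
  (acc, pe)

def gwdRound (counts : List (Int × Int)) : List (Int × Int) :=
  (counts.foldl gwdBucketStep ([], true)).1

def get_win_distribution_alt (n : Int) (rounds : Int) : List Int :=
  if n ≤ 0 then []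
  else
    let counts := (PySem.List.pyRange 0 rounds 1).foldl (fun cs _r => gwdRound cs) [((0 : Int), n)]
    counts.foldl (fun res p => res ++ List.replicate p.2.toNat p.1) []

-- ===== PRECONDITION & SPEC =====
def Spec_get_win_distribution (n : Int) (rounds : Int) (out : List Int) : Prop := out = get_win_distribution_alt n rounds
instance (n : Int) (rounds : Int) (out : List Int) : Decidable (Spec_get_win_distribution n rounds out) := by unfold Spec_get_win_distribution; infer_instance

-- ===== CLAIM (what is proved, stated in full; the proofs are below) =====
def Claim_equal_get_win_distribution : Prop := ∀ (n : Int) (rounds : Int), Dom_get_win_distribution n rounds → Spec_get_win_distribution n rounds (get_win_distribution n rounds)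

-- ===== LEMMAS AND PROOFS =====

-- A's inner loop (bump every even index), as structural recursion two at a time
def gwdBump2 : List (Int × Int) → List (Int × Int)
  | [] => []
  | [x] => [(x.1, x.2 + 1)]
  | x :: y :: r => (x.1, x.2 + 1) :: y :: gwdBump2 r

lemma gwd_range2 (L : Nat) :
    PySem.List.pyRange 0 (L : Int) 2 = (List.range ((L + 1) / 2)).map (fun k : Nat => 2 * (k : Int)) := by
  rw [PySem.List.pyRange_of_pos 0 (L : Int) (by norm_num)]
  rcases Nat.eq_zero_or_pos L with h | h
  · subst h; simp
  · rw [if_pos (by exact_mod_cast h)]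
    rw [show ((L : Int) - 0 + 2 - 1) = ((L + 1 : Nat) : Int) by push_cast; ring]
    rw [show ((2:Int)) = ((2:Nat):Int) from rfl, ← Int.natCast_div, Int.toNat_natCast]
    apply List.map_congr_left; intro k _; ring

lemma gwd_range2_cons (L : Nat) :
    PySem.List.pyRange 0 ((L : Int) + 2) 2 = 0 :: (PySem.List.pyRange 0 (L : Int) 2).map (· + 2) := by
  rw [show ((L : Int) + 2) = ((L + 2 : Nat) : Int) by push_cast; ring]
  rw [gwd_range2, gwd_range2]
  rw [show (L + 2 + 1) / 2 = (L + 1) / 2 + 1 by omega]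
  rw [List.range_succ_eq_map, List.map_cons, List.map_map, List.map_map]
  refine congrArg₂ _ (by norm_num) ?_
  apply List.map_congr_left; intro k _
  simp [Function.comp]; ring

lemma gwd_step_shift (ps : List (Int × Int)) (a b : Int × Int) (i : Int) (hi : 0 ≤ i) :
    PySem.List.pySetD (a :: b :: ps) (i + 2)
        ((PySem.List.pyGetD (a :: b :: ps) (i + 2) ((0 : Int), (0 : Int))).1,
         (PySem.List.pyGetD (a :: b :: ps) (i + 2) ((0 : Int), (0 : Int))).2 + 1)
      = a :: b :: PySem.List.pySetD ps i
        ((PySem.List.pyGetD ps i ((0 : Int), (0 : Int))).1,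
         (PySem.List.pyGetD ps i ((0 : Int), (0 : Int))).2 + 1) := by
  simp only [PySem.List.pyGetD_of_nonneg _ _ hi, PySem.List.pyGetD_of_nonneg _ _ (by omega : (0:Int) ≤ i + 2),
    PySem.List.pySetD_of_nonneg _ _ hi, PySem.List.pySetD_of_nonneg _ _ (by omega : (0:Int) ≤ i + 2)]
  rw [show (i + 2).toNat = i.toNat + 2 by omega]
  rfl

lemma gwd_fold_shift (l : List Int) (hl : ∀ i ∈ l, 0 ≤ i) (ps : List (Int × Int)) (a b : Int × Int) :
    (l.map (· + 2)).foldl (fun ps i =>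
        PySem.List.pySetD ps i ((PySem.List.pyGetD ps i ((0 : Int), (0 : Int))).1,
                                (PySem.List.pyGetD ps i ((0 : Int), (0 : Int))).2 + 1)) (a :: b :: ps)
      = a :: b :: l.foldl (fun ps i =>
        PySem.List.pySetD ps i ((PySem.List.pyGetD ps i ((0 : Int), (0 : Int))).1,
                                (PySem.List.pyGetD ps i ((0 : Int), (0 : Int))).2 + 1)) ps := by
  induction l generalizing ps a b with
  | nil => rfl
  | cons x t ih =>
    rw [List.map_cons, List.foldl_cons, List.foldl_cons,
      gwd_step_shift ps a b x (hl x (by simp))]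
    exact ih (fun i hi => hl i (by simp [hi])) _ a b

lemma gwd_step_zero (x y : Int × Int) (r : List (Int × Int)) :
    PySem.List.pySetD (x :: y :: r) 0
        ((PySem.List.pyGetD (x :: y :: r) 0 ((0 : Int), (0 : Int))).1,
         (PySem.List.pyGetD (x :: y :: r) 0 ((0 : Int), (0 : Int))).2 + 1)
      = (x.1, x.2 + 1) :: y :: r := by
  simp [PySem.List.pySetD_of_nonneg _ _ (le_refl (0:Int)), PySem.List.pyGetD_zero_cons]

lemma gwd_inner_eq_bump2 (ps : List (Int × Int)) :
    (PySem.List.pyRange 0 (ps.length : Int) 2).foldl (fun ps i =>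
        PySem.List.pySetD ps i ((PySem.List.pyGetD ps i ((0 : Int), (0 : Int))).1,
                                (PySem.List.pyGetD ps i ((0 : Int), (0 : Int))).2 + 1)) ps
      = gwdBump2 ps := by
  induction ps using gwdBump2.induct with
  | case1 => rfl
  | case2 x =>
    rw [show (([x].length : Int)) = (1 : Int) by norm_num]
    rw [show PySem.List.pyRange 0 1 2 = [0] from rfl, List.foldl_cons, List.foldl_nil]
    simp [PySem.List.pySetD_of_nonneg _ _ (le_refl (0:Int)), PySem.List.pyGetD_zero_cons, gwdBump2]
  | case3 x y r ih =>
    rw [show (((x :: y :: r).length : Int)) = ((r.length : Int) + 2) by push_cast [List.length_cons]; ring]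
    rw [gwd_range2_cons, List.foldl_cons, gwd_step_zero,
      gwd_fold_shift _ (fun i hi => ((PySem.List.mem_pyRange_iff_of_pos (by norm_num) i).1 hi).1) r _ _, ih]
    rfl

-- value-level bump with a parity flag: b = "current index is even (a winner)"
def gwdBump (b : Bool) : List Int → List Int
  | [] => []
  | x :: xs => (if b then x + 1 else x) :: gwdBump (!b) xs

-- parity flip after consuming m elements
def gwdFlip (m : Nat) (b : Bool) : Bool := if m % 2 = 0 then b else !b

-- bucket list expanded into the descending list of win values
def gwdExpand (cs : List (Int × Int)) : List Int := cs.flatMap (fun p => List.replicate p.2.toNat p.1)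

-- bucket-list invariants: strictly descending win values, positive counts
def gwdDesc (cs : List (Int × Int)) : Prop := cs.Pairwise (fun p q => q.1 < p.1)

def gwdPos (cs : List (Int × Int)) : Prop := ∀ p ∈ cs, 0 < p.2

lemma gwd_map_snd_bump2 (ps : List (Int × Int)) :
    (gwdBump2 ps).map (·.2) = gwdBump true (ps.map (·.2)) := by
  induction ps using gwdBump2.induct with
  | case1 => rfl
  | case2 x => rfl
  | case3 x y r ih => simp [gwdBump2, gwdBump, ih]

lemma gwd_bump_append (b : Bool) (xs ys : List Int) :
    gwdBump b (xs ++ ys) = gwdBump b xs ++ gwdBump (gwdFlip xs.length b) ys := by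
  induction xs generalizing b with
  | nil => simp [gwdBump, gwdFlip]
  | cons x t ih =>
    simp only [List.cons_append, gwdBump, ih (!b), List.length_cons]
    have : gwdFlip t.length (!b) = gwdFlip (t.length + 1) b := by
      unfold gwdFlip
      rcases Nat.mod_two_eq_zero_or_one t.length with h | h
      · rw [if_pos h, if_neg (by omega)]
      · rw [if_neg (by omega), if_pos (by omega), Bool.not_not]
    rw [this]

lemma gwd_bump_replicate (b : Bool) (m : Nat) (w : Int) :
    (gwdBump b (List.replicate m w)).Perm
      (List.replicate (if b then (m + 1) / 2 else m / 2) (w + 1) ++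
       List.replicate (m - (if b then (m + 1) / 2 else m / 2)) w) := by
  induction m generalizing b with
  | zero => simp [gwdBump]
  | succ m ih =>
    rw [List.replicate_succ]
    cases b with
    | true =>
      simp only [gwdBump, Bool.not_true, if_true]
      rw [show (m + 1 + 1) / 2 = m / 2 + 1 by omega]
      rw [List.replicate_succ, List.cons_append]
      refine List.Perm.cons _ ?_
      have h0 := ih false
      simp only [Bool.false_eq_true, if_false] at h0
      rw [show m + 1 - (m / 2 + 1) = m - m / 2 by omega]
      exact h0
    | false =>
      simp only [gwdBump, Bool.false_eq_true, if_false]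
      have h1 := ih true
      simp only [if_true] at h1
      refine ((h1.cons w).trans ?_)
      refine (List.perm_middle.symm.trans ?_)
      rw [show (w :: List.replicate (m - (m + 1) / 2) w) = List.replicate (m - (m + 1) / 2 + 1) w from rfl]
      rw [show m - (m + 1) / 2 + 1 = m + 1 - (m + 1) / 2 by omega]

lemma gwd_mem_expand {x : Int} {cs : List (Int × Int)} (h : x ∈ gwdExpand cs) :
    ∃ p ∈ cs, x = p.1 := by
  unfold gwdExpand at h
  rcases List.mem_flatMap.mp h with ⟨p, hp, hx⟩
  exact ⟨p, hp, List.eq_of_mem_replicate hx⟩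

lemma gwd_expand_pairwise {cs : List (Int × Int)} (h : gwdDesc cs) :
    (gwdExpand cs).Pairwise (fun a b => b ≤ a) := by
  induction cs with
  | nil => simp [gwdExpand]
  | cons p t ih =>
    rw [gwdDesc, List.pairwise_cons] at h
    unfold gwdExpand
    rw [List.flatMap_cons]
    apply List.pairwise_append.mpr
    refine ⟨List.pairwise_replicate.mpr (by simp), ih h.2, ?_⟩
    intro a ha b hb
    rcases gwd_mem_expand (cs := t) hb with ⟨q, hq, rfl⟩
    rw [List.eq_of_mem_replicate ha]
    exact le_of_lt (h.1 q hq)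

-- the sorted standings' values are determined by the value multiset
lemma gwd_sorted_snd_eq {ps : List (Int × Int)} {e : List Int}
    (hperm : (ps.map (·.2)).Perm e) (hsorted : e.Pairwise (fun a b => b ≤ a)) :
    (PySem.List.sorted ps (fun p => p.2) true).map (·.2) = e := by
  have hp : ((PySem.List.sorted ps (fun p => p.2) true).map (·.2)).Perm e :=
    ((PySem.List.sorted_perm ps (fun p => p.2) true).map (·.2)).trans hperm
  have hs : ((PySem.List.sorted ps (fun p => p.2) true).map (·.2)).Pairwise (fun a b => b ≤ a) :=
    List.pairwise_map.mpr (PySem.List.sorted_pairwise_rev ps (fun p => p.2))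
  exact hp.eq_of_pairwise (fun a b _ _ h1 h2 => le_antisymm h2 h1) hs hsorted

lemma gwd_expand_concat (acc : List (Int × Int)) (x : Int × Int) :
    gwdExpand (acc ++ [x]) = gwdExpand acc ++ List.replicate x.2.toNat x.1 := by
  simp [gwdExpand]

lemma gwd_desc_concat {acc : List (Int × Int)} {x : Int × Int} (h : gwdDesc acc)
    (hgt : ∀ p ∈ acc, x.1 < p.1) : gwdDesc (acc ++ [x]) := by
  unfold gwdDesc at *
  refine List.pairwise_append.mpr ⟨h, List.pairwise_singleton _ _, ?_⟩
  intro p hp q hq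
  rw [List.mem_singleton] at hq
  subst hq
  exact hgt p hp

-- core invariant of B's inner fold over the buckets
lemma gwd_go (cs : List (Int × Int)) (acc : List (Int × Int)) (b : Bool)
    (hcs : gwdDesc cs) (hpos : gwdPos cs) (hacc : gwdDesc acc) (haccpos : gwdPos acc)
    (hlink : ∀ p ∈ acc, ∀ q ∈ cs, q.1 + 1 ≤ p.1) :
    (gwdExpand (cs.foldl gwdBucketStep (acc, b)).1).Perm
        (gwdExpand acc ++ gwdBump b (gwdExpand cs)) ∧
      gwdDesc (cs.foldl gwdBucketStep (acc, b)).1 ∧ gwdPos (cs.foldl gwdBucketStep (acc, b)).1 := by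
  induction cs generalizing acc b with
  | nil => exact ⟨by simp [gwdExpand, gwdBump], hacc, haccpos⟩
  | cons p rest ih =>
    obtain ⟨w, k⟩ := p
    have hk : 0 < k := hpos _ (List.mem_cons_self)
    rw [List.foldl_cons]
    -- characterize the step
    set W : Int := if b then PySem.Int.floordiv (k + 1) 2 else PySem.Int.floordiv k 2 with hWdef
    have hW2 : W = if b then (k + 1) / 2 else k / 2 := by
      cases b <;>
        simp only [hWdef, PySem.Int.floordiv_eq_ediv_of_pos (by norm_num : (0:Int) < 2),
          Bool.false_eq_true, if_false, if_true]
    have hW0 : 0 ≤ W := by rw [hW2]; cases b <;> simp <;> omega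
    have hWk : W ≤ k := by rw [hW2]; cases b <;> simp <;> omega
    have hWN : W.toNat = if b then (k.toNat + 1) / 2 else k.toNat / 2 := by
      rw [hW2]; cases b <;> simp <;> omega
    set acc₁ : List (Int × Int) := if W ≠ 0 then
        (match acc.getLast? with
        | some last => if last.1 = w + 1 then acc.dropLast ++ [(w + 1, last.2 + W)]
                       else acc ++ [(w + 1, W)]
        | none => acc ++ [(w + 1, W)])
      else acc with hacc₁
    set acc₂ : List (Int × Int) := if k - W ≠ 0 then acc₁ ++ [(w, k - W)] else acc₁ with hacc₂
    set b' : Bool := if PySem.Int.mod k 2 = 1 then !b else b with hb'def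
    have hstep : gwdBucketStep (acc, b) (w, k) = (acc₂, b') := by
      simp only [gwdBucketStep, hacc₁, hacc₂, hb'def, hWdef]
    rw [hstep]
    have hlinkw : ∀ p ∈ acc, w + 1 ≤ p.1 := fun p hp => hlink p hp (w, k) List.mem_cons_self
    have hA1 : gwdExpand acc₁ = gwdExpand acc ++ List.replicate W.toNat (w + 1) ∧
        gwdDesc acc₁ ∧ gwdPos acc₁ ∧ ∀ p ∈ acc₁, w < p.1 := by
      by_cases hW : W = 0
      · rw [hacc₁, if_neg (by simpa using hW)]
        exact ⟨by simp [hW], hacc, haccpos, fun p hp => lt_of_lt_of_le (by omega) (hlinkw p hp)⟩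
      · rw [hacc₁, if_pos hW]
        cases hlast : acc.getLast? with
        | none =>
          have hnil : acc = [] := List.getLast?_eq_none_iff.mp hlast
          subst hnil
          refine ⟨by simp [gwdExpand], ?_, ?_, ?_⟩
          · exact List.pairwise_singleton _ _
          · intro p hp; rw [List.nil_append, List.mem_singleton] at hp; subst hp; simp; omega
          · intro p hp; rw [List.nil_append, List.mem_singleton] at hp; subst hp; simp
        | some last =>
          obtain ⟨l', rfl⟩ := List.getLast?_eq_some_iff.mp hlast
          simp only []
          have hdec := List.pairwise_append.mp hacc
          have hl'gt : ∀ p ∈ l', last.1 < p.1 := fun p hp =>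
            hdec.2.2 p hp last (List.mem_singleton_self last)
          have hlastpos : 0 < last.2 := haccpos last (by simp)
          by_cases hm : last.1 = w + 1
          · rw [if_pos hm, List.dropLast_concat]
            refine ⟨?_, ?_, ?_, ?_⟩
            · rw [gwd_expand_concat, gwd_expand_concat]
              rw [show (last.2 + W).toNat = last.2.toNat + W.toNat by omega]
              rw [List.replicate_add, ← List.append_assoc]
              simp [hm]
            · exact gwd_desc_concat hdec.1 (fun p hp => by
                have := hl'gt p hp; simp only; omega)
            · intro p hp
              rcases List.mem_append.mp hp with h | h
              · exact haccpos p (by simp [h])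
              · rw [List.mem_singleton] at h; subst h; simp; omega
            · intro p hp
              rcases List.mem_append.mp hp with h | h
              · have := hl'gt p h; omega
              · rw [List.mem_singleton] at h; subst h; simp
          · rw [if_neg hm]
            have hgt : ∀ p ∈ l' ++ [last], w + 1 < p.1 := by
              intro p hp
              rcases List.mem_append.mp hp with h | h
              · have h1 := hl'gt p h
                have h2 := hlinkw last (by simp)
                omega
              · rw [List.mem_singleton] at h; subst h
                have := hlinkw p (by simp)
                omega
            refine ⟨by rw [gwd_expand_concat], gwd_desc_concat hacc (fun p hp => hgt p hp), ?_, ?_⟩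
            · intro p hp
              rcases List.mem_append.mp hp with h | h
              · exact haccpos p h
              · rw [List.mem_singleton] at h; subst h; simp; omega
            · intro p hp
              rcases List.mem_append.mp hp with h | h
              · have := hgt p h; omega
              · rw [List.mem_singleton] at h; subst h; simp
    have hA2 : gwdExpand acc₂ = gwdExpand acc ++
          (List.replicate W.toNat (w + 1) ++ List.replicate (k - W).toNat w) ∧
        gwdDesc acc₂ ∧ gwdPos acc₂ ∧ ∀ p ∈ acc₂, w ≤ p.1 := by
      by_cases hL : k - W = 0
      · rw [hacc₂, if_neg (by simpa using hL)]
        refine ⟨?_, hA1.2.1, hA1.2.2.1, fun p hp => le_of_lt (hA1.2.2.2 p hp)⟩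
        rw [hA1.1, show (k - W).toNat = 0 by omega]
        simp
      · rw [hacc₂, if_pos hL]
        refine ⟨?_, gwd_desc_concat hA1.2.1 (fun p hp => hA1.2.2.2 p hp), ?_, ?_⟩
        · rw [gwd_expand_concat, hA1.1, List.append_assoc]
        · intro p hp
          rcases List.mem_append.mp hp with h | h
          · exact hA1.2.2.1 p h
          · rw [List.mem_singleton] at h; subst h; simp; omega
        · intro p hp
          rcases List.mem_append.mp hp with h | h
          · exact le_of_lt (hA1.2.2.2 p h)
          · rw [List.mem_singleton] at h; subst h; simp
    have hcs' : gwdDesc rest := (List.pairwise_cons.mp hcs).2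
    have hhead : ∀ q ∈ rest, q.1 < w := fun q hq => (List.pairwise_cons.mp hcs).1 q hq
    have hpos' : gwdPos rest := fun q hq => hpos q (by simp [hq])
    have hlink' : ∀ p ∈ acc₂, ∀ q ∈ rest, q.1 + 1 ≤ p.1 := by
      intro p hp q hq
      have h1 := hA2.2.2.2 p hp
      have h2 := hhead q hq
      omega
    obtain ⟨ihP, ihD, ihPos⟩ := ih acc₂ b' hcs' hpos' hA2.2.1 hA2.2.2.1 hlink'
    refine ⟨?_, ihD, ihPos⟩
    have hb'' : b' = gwdFlip k.toNat b := by
      rw [hb'def, gwdFlip, PySem.Int.mod_eq_emod_of_pos (by norm_num : (0:Int) < 2)]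
      by_cases h : k.toNat % 2 = 0
      · rw [if_neg (by omega), if_pos h]
      · rw [if_pos (by omega), if_neg h]
    have hexp : gwdExpand ((w, k) :: rest) = List.replicate k.toNat w ++ gwdExpand rest := by
      simp [gwdExpand]
    refine ihP.trans ?_
    rw [hA2.1, hexp, gwd_bump_append, List.length_replicate, List.append_assoc, ← hb'']
    refine List.Perm.append_left _ ?_
    refine List.Perm.append_right _ ?_
    have hrep := (gwd_bump_replicate b k.toNat w).symm
    rw [show (k - W).toNat = k.toNat - (if b then (k.toNat + 1) / 2 else k.toNat / 2) by omega,
        hWN]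
    exact hrep

lemma gwd_round_spec (cs : List (Int × Int)) (hcs : gwdDesc cs) (hpos : gwdPos cs) :
    (gwdExpand (gwdRound cs)).Perm (gwdBump true (gwdExpand cs)) ∧
      gwdDesc (gwdRound cs) ∧ gwdPos (gwdRound cs) := by
  have h := gwd_go cs [] true hcs hpos (List.Pairwise.nil) (by intro p hp; simp at hp)
    (by intro p hp; simp at hp)
  unfold gwdRound
  refine ⟨h.1.trans (by simp [gwdExpand]), h.2.1, h.2.2⟩

-- joint invariant carried through the rounds loop
def gwdRel (ps : List (Int × Int)) (cs : List (Int × Int)) : Prop :=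
  (ps.map (·.2)).Perm (gwdExpand cs) ∧ gwdDesc cs ∧ gwdPos cs

lemma gwd_rel_step {ps cs} (h : gwdRel ps cs) :
    gwdRel (gwdBump2 (PySem.List.sorted ps (fun p => p.2) true)) (gwdRound cs) := by
  obtain ⟨hperm, hdesc, hpos⟩ := h
  obtain ⟨hR, hRd, hRp⟩ := gwd_round_spec cs hdesc hpos
  refine ⟨?_, hRd, hRp⟩
  have hs : (PySem.List.sorted ps (fun p => p.2) true).map (·.2) = gwdExpand cs :=
    gwd_sorted_snd_eq hperm (gwd_expand_pairwise hdesc)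
  rw [gwd_map_snd_bump2, hs]
  exact hR.symm

lemma gwd_rel_fold (l : List Int) {ps cs} (h : gwdRel ps cs) :
    gwdRel (l.foldl (fun ps _ => gwdBump2 (PySem.List.sorted ps (fun p => p.2) true)) ps)
           (l.foldl (fun cs _ => gwdRound cs) cs) := by
  induction l generalizing ps cs with
  | nil => exact h
  | cons x t ih => exact ih (gwd_rel_step h)

lemma gwd_fold_nil (l : List Int) :
    l.foldl (fun ps _ => gwdBump2 (PySem.List.sorted ps (fun p : Int × Int => p.2) true)) [] = [] := by
  induction l with
  | nil => rfl
  | cons x t ih => simpa using ih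

lemma gwd_main (n rounds : Int) : get_win_distribution n rounds = get_win_distribution_alt n rounds := by
  unfold get_win_distribution get_win_distribution_alt
  simp only [gwd_inner_eq_bump2]
  by_cases hn : n ≤ 0
  · rw [if_pos hn, PySem.List.pyRange_one_eq_nil hn]
    simp only [List.map_nil, gwd_fold_nil]
    rfl
  · rw [if_neg hn]
    have hrel0 : gwdRel ((PySem.List.pyRange 0 n 1).map (fun p => (p, (0 : Int)))) [((0 : Int), n)] := by
      refine ⟨?_, List.pairwise_singleton _ _, by intro p hp; rw [List.mem_singleton] at hp; subst hp; simpa using by omega⟩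
      rw [List.map_map]
      have : ((PySem.List.pyRange 0 n 1).map ((fun p : Int × Int => p.2) ∘ (fun p => (p, (0 : Int)))))
          = List.replicate (PySem.List.pyRange 0 n 1).length 0 := by
        rw [show ((fun p : Int × Int => p.2) ∘ (fun p : Int => (p, (0 : Int)))) = (fun _ : Int => (0 : Int)) from rfl,
          List.map_const']
      rw [this, PySem.List.length_pyRange_one]
      simp [gwdExpand]
    have hrel := gwd_rel_fold (PySem.List.pyRange 0 rounds 1) hrel0
    obtain ⟨hperm, hdesc, hpos⟩ := hrel
    rw [PySem.List.foldl_append_eq_flatMap (fun p : Int × Int => List.replicate p.2.toNat p.1)]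
    rw [List.nil_append]
    exact gwd_sorted_snd_eq hperm (gwd_expand_pairwise hdesc)

-- ===== VERDICT (by name: the statement is the Claim_ definition above) =====
theorem get_win_distribution_spec : Claim_equal_get_win_distribution := by
  intro n rounds _
  unfold Spec_get_win_distribution
  exact gwd_main n rounds
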